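-- pv_equiv track=rewrite | github.com/mattgonzalesced/CED_Extensions | CEDLib.lib/CEDElectrical/Infrastructure/Revit/repositories/panel_schedule_repository.py | get_slot_row_order
-- ===== SOURCE A (Python) =====
-- SORT_MODE_PANELBOARD_ACROSS = "panelboard_two_columns_across"
--
-- SORT_MODE_PANELBOARD_DOWN = "panelboard_two_columns_down"
--
-- def _to_text(value, fallback=""):
--     """Return a safe text representation."""
--     if value is None:
--         return fallback
--     try:
--         return str(value)
--     except Exception:
--         return fallback
--
-- def get_slot_row_order(max_slot, sort_mode):
--     """Return row-wise slot order (top-to-bottom rows) independent of add sequencing."""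
--     slot_count = int(max(0, max_slot or 0))
--     if slot_count <= 0:
--         return []
--     mode = _to_text(sort_mode, SORT_MODE_PANELBOARD_ACROSS).strip().lower()
--     if mode == "panelboard":
--         mode = SORT_MODE_PANELBOARD_ACROSS
--     if mode == SORT_MODE_PANELBOARD_DOWN:
--         left_count = int((slot_count + 1) / 2)
--         ordered = []
--         for row_slot in range(1, left_count + 1):
--             ordered.append(int(row_slot))
--             right_slot = int(left_count + row_slot)
--             if right_slot <= slot_count:
--                 ordered.append(int(right_slot))
--         return ordered
--     return list(range(1, slot_count + 1))
-- ===== SOURCE B (Python) =====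
-- SORT_MODE_PANELBOARD_ACROSS = "panelboard_two_columns_across"
-- SORT_MODE_PANELBOARD_DOWN = "panelboard_two_columns_down"
--
--
-- def get_slot_row_order(max_slot, sort_mode):
--     """Row-wise slot order: sort the slot numbers by their row-major rank."""
--     slot_count = int(max(0, max_slot or 0))
--     if slot_count <= 0:
--         return []
--     mode = (sort_mode or SORT_MODE_PANELBOARD_ACROSS).strip().lower()
--     if mode == "panelboard":
--         mode = SORT_MODE_PANELBOARD_ACROSS
--     slots = list(range(1, slot_count + 1))
--     if mode == SORT_MODE_PANELBOARD_DOWN: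
--         left_count = (slot_count + 1) // 2
--         # rank of slot s in the row-major reading: row*2 + column
--         slots.sort(key=lambda s: 2 * (s - left_count) + 1 if s > left_count else 2 * s)
--     return slots
-- ===== Notes on version B (the rewrite author's own statement) =====
-- stated objective: alternative
-- what changed: The DOWN-mode generation loop (append left slot, compute and bounds-check its right partner) is replaced by building the plain slot list once and sorting it by each slot's row-major rank key.
import Mathlib
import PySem

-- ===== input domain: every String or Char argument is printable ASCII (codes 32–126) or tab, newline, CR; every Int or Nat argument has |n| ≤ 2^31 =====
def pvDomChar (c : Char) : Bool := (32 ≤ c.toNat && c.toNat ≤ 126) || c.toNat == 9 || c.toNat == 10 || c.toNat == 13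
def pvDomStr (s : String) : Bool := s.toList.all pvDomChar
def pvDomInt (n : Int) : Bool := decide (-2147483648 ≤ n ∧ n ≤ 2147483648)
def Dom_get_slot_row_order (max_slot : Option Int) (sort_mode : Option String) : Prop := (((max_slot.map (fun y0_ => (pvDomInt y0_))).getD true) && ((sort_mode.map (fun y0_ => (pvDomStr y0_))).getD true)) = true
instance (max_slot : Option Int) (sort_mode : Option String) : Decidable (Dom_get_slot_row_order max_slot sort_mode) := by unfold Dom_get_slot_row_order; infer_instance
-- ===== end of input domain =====

-- B replaces A's DOWN-mode generation loop by sorting the plain slot list by each slot's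
-- row-major rank key (alternative decomposition, same results).

-- ===== PORT A =====
def get_slot_row_order (max_slot : Option Int) (sort_mode : Option String) : List Int :=
  -- `max_slot or 0` maps None to 0 and leaves 0 as 0, i.e. exactly `getD 0`
  let slot_count : Int := max 0 (max_slot.getD 0)
  if slot_count ≤ 0 then []
  else
    -- _to_text(sort_mode, ACROSS): str of a str is itself, None gives the fallback
    let mode := PySem.Str.lower (PySem.Str.strip (sort_mode.getD "panelboard_two_columns_across"))
    let mode := if mode = "panelboard" then "panelboard_two_columns_across" else mode
    if mode = "panelboard_two_columns_down" then
      -- int((slot_count+1)/2): exact float division truncation = floordiv on these positive in-domain ints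
      let left_count := PySem.Int.floordiv (slot_count + 1) 2
      (PySem.List.pyRange 1 (left_count + 1)).foldl
        (fun ordered row_slot =>
          let ordered := ordered ++ [row_slot]
          let right_slot := left_count + row_slot
          if right_slot ≤ slot_count then ordered ++ [right_slot] else ordered) []
    else
      PySem.List.pyRange 1 (slot_count + 1)

-- ===== PORT B =====
-- the lambda `2 * (s - left_count) + 1 if s > left_count else 2 * s` (row-major rank of slot s)
def rankKey (left_count s : Int) : Int :=
  if left_count < s then 2 * (s - left_count) + 1 else 2 * s

def get_slot_row_order_alt (max_slot : Option Int) (sort_mode : Option String) : List Int :=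
  let slot_count : Int := max 0 (max_slot.getD 0)
  if slot_count ≤ 0 then []
  else
    -- `sort_mode or ACROSS`: None and "" are falsy
    let mode0 := match sort_mode with
      | none => "panelboard_two_columns_across"
      | some s => if s = "" then "panelboard_two_columns_across" else s
    let mode := PySem.Str.lower (PySem.Str.strip mode0)
    let mode := if mode = "panelboard" then "panelboard_two_columns_across" else mode
    let slots := PySem.List.pyRange 1 (slot_count + 1)
    if mode = "panelboard_two_columns_down" then
      let left_count := PySem.Int.floordiv (slot_count + 1) 2
      PySem.List.sorted slots (rankKey left_count)
    else
      slots

-- ===== PRECONDITION & SPEC =====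
def Spec_get_slot_row_order (max_slot : Option Int) (sort_mode : Option String) (out : List Int) : Prop := out = get_slot_row_order_alt max_slot sort_mode
instance (max_slot : Option Int) (sort_mode : Option String) (out : List Int) : Decidable (Spec_get_slot_row_order max_slot sort_mode out) := by unfold Spec_get_slot_row_order; infer_instance

-- ===== CLAIM (what is proved, stated in full; the proofs are below) =====
def Claim_equal_get_slot_row_order : Prop := ∀ (max_slot : Option Int) (sort_mode : Option String), Dom_get_slot_row_order max_slot sort_mode → Spec_get_slot_row_order max_slot sort_mode (get_slot_row_order max_slot sort_mode)

-- ===== LEMMAS AND PROOFS =====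

-- proof-only intermediate: the row-wise interleaving of the two column lists
def interleaveZL : List Int → List Int → List Int
  | [], _ => []
  | x :: xs, [] => x :: interleaveZL xs []
  | x :: xs, y :: ys => x :: y :: interleaveZL xs ys

lemma mem_interleaveZL {x : Int} : ∀ {xs ys : List Int}, x ∈ interleaveZL xs ys → x ∈ xs ∨ x ∈ ys
  | [], _, h => by simp [interleaveZL] at h
  | a :: xs, [], h => by
    rcases (by simpa [interleaveZL] using h : x = a ∨ x ∈ interleaveZL xs []) with h | h
    · exact Or.inl (by simp [h])
    · rcases mem_interleaveZL h with h | h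
      · exact Or.inl (by simp [h])
      · simp at h
  | a :: xs, b :: ys, h => by
    rcases (by simpa [interleaveZL] using h : x = a ∨ x = b ∨ x ∈ interleaveZL xs ys) with h | h | h
    · exact Or.inl (by simp [h])
    · exact Or.inr (by simp [h])
    · rcases mem_interleaveZL h with h | h
      · exact Or.inl (by simp [h])
      · exact Or.inr (by simp [h])

lemma interleaveZL_perm : ∀ (xs ys : List Int), ys.length ≤ xs.length → (interleaveZL xs ys).Perm (xs ++ ys)
  | [], ys, h => by
    have : ys = [] := List.eq_nil_of_length_eq_zero (by simpa using h)
    simp [this, interleaveZL]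
  | x :: xs, [], _ => by
    simpa [interleaveZL] using (interleaveZL_perm xs [] (by simp)).cons x
  | x :: xs, y :: ys, h => by
    refine ((interleaveZL_perm xs ys (by simpa using h)).cons y).cons x |>.trans ?_
    simpa using (List.perm_middle (a := y) (l₁ := xs) (l₂ := ys)).symm.cons x

-- A's DOWN loop equals the interleave of the two column ranges.
lemma foldA (L n : Int) (k : Nat) : ∀ (a : Int) (acc : List Int), (L + 1 - a).toNat ≤ k →
    (PySem.List.pyRange a (L + 1)).foldl
      (fun ordered row_slot =>
        let ordered := ordered ++ [row_slot]
        let right_slot := L + row_slot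
        if right_slot ≤ n then ordered ++ [right_slot] else ordered) acc
    = acc ++ interleaveZL (PySem.List.pyRange a (L + 1)) (PySem.List.pyRange (L + a) (n + 1)) := by
  induction k with
  | zero =>
    intro a acc h
    have ha : L + 1 ≤ a := by omega
    rw [PySem.List.pyRange_one_eq_nil ha]
    simp [interleaveZL]
  | succ k ih =>
    intro a acc h
    by_cases ha : L + 1 ≤ a
    · rw [PySem.List.pyRange_one_eq_nil ha]
      simp [interleaveZL]
    · have ha' : a < L + 1 := by omega
      rw [PySem.List.pyRange_one_cons ha']
      by_cases hr : L + a ≤ n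
      · have hrn : L + a < n + 1 := by omega
        rw [PySem.List.pyRange_one_cons hrn]
        simp only [List.foldl_cons, interleaveZL]
        rw [if_pos hr]
        have : L + a + 1 = L + (a + 1) := by ring
        rw [this, ih (a + 1) (acc ++ [a] ++ [L + a]) (by omega)]
        simp
      · have hrn : n + 1 ≤ L + a := by omega
        rw [PySem.List.pyRange_one_eq_nil hrn]
        simp only [List.foldl_cons, interleaveZL]
        rw [if_neg hr]
        have h2 : PySem.List.pyRange (L + (a + 1)) (n + 1) = [] :=
          PySem.List.pyRange_one_eq_nil (by omega)
        rw [ih (a + 1) (acc ++ [a]) (by omega), h2]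
        simp

-- the interleave of the two column ranges is strictly increasing under rankKey
lemma pairwise_rankKey (L n : Int) (k : Nat) : ∀ (a : Int), 1 ≤ a → L ≤ n → n ≤ 2 * L →
    (L + 1 - a).toNat ≤ k →
    List.Pairwise (fun x y => rankKey L x < rankKey L y)
      (interleaveZL (PySem.List.pyRange a (L + 1)) (PySem.List.pyRange (L + a) (n + 1))) := by
  induction k with
  | zero =>
    intro a _ _ _ h
    rw [PySem.List.pyRange_one_eq_nil (by omega)]
    simp [interleaveZL]
  | succ k ih =>
    intro a ha1 hLn hn2L h
    by_cases ha : L + 1 ≤ a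
    · rw [PySem.List.pyRange_one_eq_nil ha]
      simp [interleaveZL]
    · have ha' : a < L + 1 := by omega
      rw [PySem.List.pyRange_one_cons ha']
      by_cases hr : L + a < n + 1
      · rw [PySem.List.pyRange_one_cons hr]
        have heq : L + a + 1 = L + (a + 1) := by ring
        simp only [interleaveZL, heq, List.pairwise_cons]
        have hmem : ∀ x ∈ interleaveZL (PySem.List.pyRange (a + 1) (L + 1))
            (PySem.List.pyRange (L + (a + 1)) (n + 1)),
            (a + 1 ≤ x ∧ x ≤ L) ∨ (L + a + 1 ≤ x ∧ x ≤ n) := by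
          intro x hx
          rcases mem_interleaveZL hx with hx | hx <;>
            rcases PySem.List.mem_pyRange_one.mp hx with ⟨h1, h2⟩
          · exact Or.inl ⟨h1, by omega⟩
          · exact Or.inr ⟨by omega, by omega⟩
        refine ⟨?_, ?_, ih (a + 1) (by omega) hLn hn2L (by omega)⟩
        · intro y hy
          rcases (by simpa [interleaveZL] using hy :
              y = L + a ∨ y ∈ interleaveZL (PySem.List.pyRange (a + 1) (L + 1))
                (PySem.List.pyRange (L + (a + 1)) (n + 1))) with hy | hy
          · subst hy; unfold rankKey; split_ifs <;> omega
          · rcases hmem y hy with ⟨h1, h2⟩ | ⟨h1, h2⟩ <;>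
              · unfold rankKey; split_ifs <;> omega
        · intro y hy
          rcases hmem y hy with ⟨h1, h2⟩ | ⟨h1, h2⟩ <;>
            · unfold rankKey; split_ifs <;> omega
      · have hrn : n + 1 ≤ L + a := by omega
        rw [PySem.List.pyRange_one_eq_nil hrn]
        simp only [interleaveZL, List.pairwise_cons]
        have h2 : PySem.List.pyRange (L + (a + 1)) (n + 1) = [] :=
          PySem.List.pyRange_one_eq_nil (by omega)
        refine ⟨?_, ?_⟩
        · intro y hy
          rcases mem_interleaveZL hy with hy | hy
          · rcases PySem.List.mem_pyRange_one.mp hy with ⟨h1, h2⟩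
            unfold rankKey; split_ifs <;> omega
          · simp at hy
        · have := ih (a + 1) (by omega) hLn hn2L (by omega)
          rwa [h2] at this
  
-- B's sort equals A's DOWN loop result
lemma down_branch (n : Int) (hn : 1 ≤ n) :
    (PySem.List.pyRange 1 (PySem.Int.floordiv (n + 1) 2 + 1)).foldl
      (fun ordered row_slot =>
        let ordered := ordered ++ [row_slot]
        let right_slot := PySem.Int.floordiv (n + 1) 2 + row_slot
        if right_slot ≤ n then ordered ++ [right_slot] else ordered) []
    = PySem.List.sorted (PySem.List.pyRange 1 (n + 1))
        (rankKey (PySem.Int.floordiv (n + 1) 2)) := by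
  set L := PySem.Int.floordiv (n + 1) 2 with hL
  have hmul := PySem.Int.floordiv_mul_add_mod (n + 1) 2
  have hm0 := PySem.Int.mod_nonneg (n + 1) (b := 2) (by omega)
  have hm1 := PySem.Int.mod_lt (n + 1) (b := 2) (by omega)
  have hLn : L ≤ n := by omega
  have hn2L : n ≤ 2 * L := by omega
  rw [foldA L n L.toNat 1 [] (by omega)]
  refine (PySem.List.sorted_eq_of_perm_of_pairwise_lt _ _ _ ?_ ?_).symm
  · refine (interleaveZL_perm _ _ ?_).trans ?_
    · rw [PySem.List.length_pyRange_one, PySem.List.length_pyRange_one]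
      omega
    · rw [← PySem.List.pyRange_one_append 1 (L + 1) (n + 1) (by omega) (by omega)]
  · simpa using pairwise_rankKey L n L.toNat 1 (by omega) hLn hn2L (by omega)

-- the two mode branches agree whenever the normalized modes agree on being "down"
lemma core (n : Int) (hn : 1 ≤ n) (mA mB : String)
    (h : (mA = "panelboard_two_columns_down") ↔ (mB = "panelboard_two_columns_down")) :
    (if mA = "panelboard_two_columns_down" then
      (PySem.List.pyRange 1 (PySem.Int.floordiv (n + 1) 2 + 1)).foldl
        (fun ordered row_slot =>
          let ordered := ordered ++ [row_slot]
          let right_slot := PySem.Int.floordiv (n + 1) 2 + row_slot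
          if right_slot ≤ n then ordered ++ [right_slot] else ordered) []
    else PySem.List.pyRange 1 (n + 1))
    = (if mB = "panelboard_two_columns_down" then
      PySem.List.sorted (PySem.List.pyRange 1 (n + 1)) (rankKey (PySem.Int.floordiv (n + 1) 2))
    else PySem.List.pyRange 1 (n + 1)) := by
  by_cases hA : mA = "panelboard_two_columns_down"
  · rw [if_pos hA, if_pos (h.mp hA)]
    exact down_branch n hn
  · rw [if_neg hA, if_neg (fun hB => hA (h.mpr hB))]

-- ===== VERDICT (by name: the statement is the Claim_ definition above) =====
theorem get_slot_row_order_spec : Claim_equal_get_slot_row_order := by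
  intro max_slot sort_mode _
  unfold Spec_get_slot_row_order get_slot_row_order get_slot_row_order_alt
  simp only []
  by_cases hn : max 0 (max_slot.getD 0) ≤ 0
  · rw [if_pos hn, if_pos hn]
  · rw [if_neg hn, if_neg hn]
    apply core _ (by omega)
    rcases sort_mode with _ | s
    · decide
    · by_cases hs : s = ""
      · subst hs; decide
      · simp only [Option.getD_some, if_neg hs]
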